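-- pv_equiv track=rewrite | github.com/knowknack/python-tetris | Project/Tetris2.py | is_movement_possible
-- ===== SOURCE A (Python) =====
-- from typing import List
--
-- def is_movement_possible(shape: List[List[int]], position: List[int]) -> bool:
--     for i in range(4):
--         for j in range(4):
--             if shape[i][j] == 0:
--                 continue
--
--             if j + position[0] < 0 or j + position[0] > 7:
--                 return False
--
--             if i + position[1] < 0 or i + position[1] > 15:
--                 return False
--
--     return True
-- ===== SOURCE B (Python) =====
-- from typing import List
--
-- CELLS = [(i, j) for i in range(4) for j in range(4)]
--
-- def is_movement_possible(shape: List[List[int]], position: List[int]) -> bool: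
--     def ok(cells):
--         if not cells:
--             return True
--         i, j = cells[0]
--         if shape[i][j] and not (0 <= j + position[0] <= 7 and 0 <= i + position[1] <= 15):
--             return False
--         return ok(cells[1:])
--     return ok(CELLS)
-- ===== Notes on version B (the rewrite author's own statement) =====
-- stated objective: alternative
-- what changed: B replaces A's nested index loops with separate x- and y-bound early returns by structural recursion over a precomputed flat list of the 16 cell coordinates, rejecting a cell with one combined chained-comparison bounds predicate.
import Mathlib
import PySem

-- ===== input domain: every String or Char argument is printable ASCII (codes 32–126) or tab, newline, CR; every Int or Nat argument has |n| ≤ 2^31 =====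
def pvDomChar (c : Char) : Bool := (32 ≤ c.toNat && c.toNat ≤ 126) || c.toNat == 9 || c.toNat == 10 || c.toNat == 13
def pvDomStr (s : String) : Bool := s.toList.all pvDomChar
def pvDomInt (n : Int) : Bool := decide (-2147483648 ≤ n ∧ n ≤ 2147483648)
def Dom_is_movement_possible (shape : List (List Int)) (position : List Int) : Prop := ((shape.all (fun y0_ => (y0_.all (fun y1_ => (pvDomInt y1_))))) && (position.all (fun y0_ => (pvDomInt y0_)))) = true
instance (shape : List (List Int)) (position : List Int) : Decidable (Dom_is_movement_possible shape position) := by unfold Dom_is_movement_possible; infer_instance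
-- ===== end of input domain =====

-- B differs from A in decomposition only: structural recursion over a precomputed flat list of the
-- 16 cell coordinates with one combined chained-comparison bounds predicate, instead of A's nested
-- index loops with separate x- and y-bound early returns.  Both Pythons raise IndexError on exactly
-- the same inputs (same access order, same short-circuiting); the theorems are about return values,
-- and the shared accessors below use a 0 default exactly where both Pythons would raise.
def pvCell (shape : List (List Int)) (i j : Int) : Int :=
  match PySem.List.pyGet? shape i with
  | some row => (PySem.List.pyGet? row j).getD 0
  | none => 0

def pvPos (position : List Int) (k : Int) : Int :=
  (PySem.List.pyGet? position k).getD 0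

-- ===== PORT A =====
def is_movement_possible (shape : List (List Int)) (position : List Int) : Bool :=
  (PySem.List.pyRange 0 4 1).all (fun i =>
    (PySem.List.pyRange 0 4 1).all (fun j =>
      if pvCell shape i j = 0 then true
      else if j + pvPos position 0 < 0 ∨ j + pvPos position 0 > 7 then false
      else if i + pvPos position 1 < 0 ∨ i + pvPos position 1 > 15 then false
      else true))

-- ===== PORT B =====
-- the module constant CELLS of Source B
def pvCELLS : List (Int × Int) :=
  (PySem.List.pyRange 0 4 1).flatMap (fun i =>
    (PySem.List.pyRange 0 4 1).map (fun j => (i, j)))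

-- the inner recursive helper 'ok' of Source B
def pvOk (shape : List (List Int)) (position : List Int) : List (Int × Int) → Bool
  | [] => true
  | c :: rest =>
    if pvCell shape c.1 c.2 ≠ 0 ∧
        ¬(0 ≤ c.2 + pvPos position 0 ∧ c.2 + pvPos position 0 ≤ 7 ∧
          0 ≤ c.1 + pvPos position 1 ∧ c.1 + pvPos position 1 ≤ 15) then false
    else pvOk shape position rest

def is_movement_possible_alt (shape : List (List Int)) (position : List Int) : Bool :=
  pvOk shape position pvCELLS

-- ===== PRECONDITION & SPEC =====
-- Pre_ is exactly the set of inputs on which both Pythons return (they perform the same accesses in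
-- the same order): scanning the 16 cells row-major, every cell whose access would raise (missing
-- shape index, or a filled cell with too short a position) is preceded by a cell that already
-- returns False.  Self-contained helpers (Nat indexing; the 0 defaults are guarded by the bounds):
def pvAccP (shape : List (List Int)) (k : Nat) : Prop :=
  k / 4 < shape.length ∧ k % 4 < (shape.getD (k / 4) []).length

def pvCellP (shape : List (List Int)) (k : Nat) : Int :=
  (shape.getD (k / 4) []).getD (k % 4) 0

def pvXOutP (position : List Int) (k : Nat) : Prop :=
  ((k % 4 : Nat) : Int) + position.getD 0 0 < 0 ∨ ((k % 4 : Nat) : Int) + position.getD 0 0 > 7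

def pvYOutP (position : List Int) (k : Nat) : Prop :=
  ((k / 4 : Nat) : Int) + position.getD 1 0 < 0 ∨ ((k / 4 : Nat) : Int) + position.getD 1 0 > 15

-- the scan returns False at cell k
def pvRetFP (shape : List (List Int)) (position : List Int) (k : Nat) : Prop :=
  pvAccP shape k ∧ pvCellP shape k ≠ 0 ∧ 1 ≤ position.length ∧
    (pvXOutP position k ∨ (¬ pvXOutP position k ∧ 2 ≤ position.length ∧ pvYOutP position k))

-- the scan raises at cell k
def pvRaiseAtP (shape : List (List Int)) (position : List Int) (k : Nat) : Prop :=
  ¬ pvAccP shape k ∨ (pvCellP shape k ≠ 0 ∧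
    (position.length < 1 ∨ (¬ pvXOutP position k ∧ position.length < 2)))

def Pre_is_movement_possible (shape : List (List Int)) (position : List Int) : Prop :=
  ∀ k ∈ List.range 16, pvRaiseAtP shape position k →
    ∃ k' ∈ List.range 16, k' < k ∧ pvRetFP shape position k'
instance (shape : List (List Int)) (position : List Int) : Decidable (Pre_is_movement_possible shape position) := by
  unfold Pre_is_movement_possible pvRaiseAtP pvRetFP pvAccP pvXOutP pvYOutP; infer_instance

def pvWitness_is_movement_possible : List (List Int) × List Int :=
  ([[1,0,0,0],[0,0,0,0],[0,0,0,0],[0,0,0,0]], [3,5])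

def Spec_is_movement_possible (shape : List (List Int)) (position : List Int) (out : Bool) : Prop := out = is_movement_possible_alt shape position
instance (shape : List (List Int)) (position : List Int) (out : Bool) : Decidable (Spec_is_movement_possible shape position out) := by unfold Spec_is_movement_possible; infer_instance

-- ===== CLAIM (what is proved, stated in full; the proofs are below) =====
def Claim_equal_is_movement_possible : Prop := ∀ (shape : List (List Int)) (position : List Int), Dom_is_movement_possible shape position → Pre_is_movement_possible shape position → Spec_is_movement_possible shape position (is_movement_possible shape position)

-- ===== LEMMAS AND PROOFS =====

-- A's loop body as a proposition
lemma body_iff (c x y : Int) :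
    (if c = 0 then true
     else if x < 0 ∨ x > 7 then false
     else if y < 0 ∨ y > 15 then false
     else true) = true ↔ (c ≠ 0 → (0 ≤ x ∧ x ≤ 7) ∧ (0 ≤ y ∧ y ≤ 15)) := by
  split_ifs <;> simp_all <;> omega

-- B's recursion as a proposition
lemma pvOk_iff (shape : List (List Int)) (position : List Int) (l : List (Int × Int)) :
    pvOk shape position l = true ↔
      ∀ c ∈ l, pvCell shape c.1 c.2 ≠ 0 →
        (0 ≤ c.2 + pvPos position 0 ∧ c.2 + pvPos position 0 ≤ 7) ∧
        (0 ≤ c.1 + pvPos position 1 ∧ c.1 + pvPos position 1 ≤ 15) := by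
  induction l with
  | nil => simp [pvOk]
  | cons c rest ih =>
    rw [pvOk]
    split_ifs with h
    · simp only [false_iff]
      intro hall
      exact h.2 (by have := hall c (by simp) h.1; tauto)
    · simp only [ih, List.mem_cons]
      constructor
      · rintro hall d (rfl | hd) hc
        · constructor <;> constructor <;> by_contra <;> exact h ⟨hc, by tauto⟩
        · exact hall d hd hc
      · intro hall d hd hc
        exact hall d (Or.inr hd) hc

-- the coordinate list enumerates exactly the nested ranges
lemma cells_iff (Q : Int × Int → Prop) :
    (∀ c ∈ pvCELLS, Q c) ↔
      ∀ i ∈ PySem.List.pyRange 0 4 1, ∀ j ∈ PySem.List.pyRange 0 4 1, Q (i, j) := by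
  have hc : pvCELLS = [(0,0),(0,1),(0,2),(0,3),(1,0),(1,1),(1,2),(1,3),
                       (2,0),(2,1),(2,2),(2,3),(3,0),(3,1),(3,2),(3,3)] := by decide
  have hr : PySem.List.pyRange 0 4 1 = [0,1,2,3] := by decide
  rw [hc, hr]
  constructor
  · intro h i hi j hj
    fin_cases hi <;> fin_cases hj <;> exact h _ (by decide)
  · intro h c hc
    fin_cases hc <;> exact h _ (by decide) _ (by decide)

lemma ports_agree (shape : List (List Int)) (position : List Int) :
    is_movement_possible shape position = is_movement_possible_alt shape position := by
  rw [Bool.eq_iff_iff]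
  unfold is_movement_possible is_movement_possible_alt
  simp only [List.all_eq_true, body_iff, pvOk_iff]
  exact (cells_iff (fun c => pvCell shape c.1 c.2 ≠ 0 →
    (0 ≤ c.2 + pvPos position 0 ∧ c.2 + pvPos position 0 ≤ 7) ∧
    0 ≤ c.1 + pvPos position 1 ∧ c.1 + pvPos position 1 ≤ 15)).symm

-- ===== VERDICT (by name: the statement is the Claim_ definition above) =====
theorem is_movement_possible_spec : Claim_equal_is_movement_possible := by
  intro shape position _ _
  exact ports_agree shape position
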